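-- pv_equiv track=rewrite | github.com/AditMeh/CSC110-Final-Project | generate_dictionary.py | compute_class_word_frequency_dicts
-- ===== SOURCE A (Python) =====
-- from typing import List, Dict
--
-- def compute_class_word_frequency_dicts(processed_dataset: List[List[str]],
--                                        labels: List[int],
--                                        chosen_label: int) -> Dict[str, int]:
--     """
--     This function outputs a that dictionary contains the frequency
--     of each word in the samples which correspond to the class of the key.
--
--     Preconditions:
--         - all(all(word != "" for word in tweet) for tweet in processed_dataset)
--         - all(item in {-1, 0, 1, 2} for item in labels)
--
--     :param chosen_label:
--         The label that we want to compute the word frequency mapping of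
--     :param labels:
--         The list of labels for each of the elements in the processed_dataset
--     :param processed_dataset:
--         A list of preprocessed sentences
--     :return:
--         A dictionary mapping of a word to how many times it appears
--         in samples of the given class
--
--         >>> dataset = [['a', 'a', 'a'], ['b', 'b', 'a']]
--         >>> dataset_classes = [1, 0]
--         >>> compute_class_word_frequency_dicts(dataset, dataset_classes, 1)
--         {'a': 3}
--     """
--
--     # word counts accumulator
--     class_counts_dict = {}
--
--     for i in range(len(processed_dataset)):
--
--         # check if the label of the sample corresponds to the class we want
--         if labels[i] == chosen_label:
--
--             for word in processed_dataset[i]: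
--                 if word not in class_counts_dict:
--                     class_counts_dict[word] = 1
--                 elif word in class_counts_dict:
--                     class_counts_dict[word] += 1
--
--     return class_counts_dict
-- ===== SOURCE B (Python) =====
-- def compute_class_word_frequency_dicts(processed_dataset, labels, chosen_label):
--     words = [w for tweet, label in zip(processed_dataset, labels)
--              if label == chosen_label for w in tweet]
--     return {w: words.count(w) for w in dict.fromkeys(words)}
-- ===== Notes on version B (the rewrite author's own statement) =====
-- stated objective: simpler
-- what changed: Replaces the index-driven nested loops with mutable dict accumulation by a flat comprehension gathering the chosen-label words via zip, followed by a per-distinct-word count over first-seen keys (dict.fromkeys).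
import Mathlib
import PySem

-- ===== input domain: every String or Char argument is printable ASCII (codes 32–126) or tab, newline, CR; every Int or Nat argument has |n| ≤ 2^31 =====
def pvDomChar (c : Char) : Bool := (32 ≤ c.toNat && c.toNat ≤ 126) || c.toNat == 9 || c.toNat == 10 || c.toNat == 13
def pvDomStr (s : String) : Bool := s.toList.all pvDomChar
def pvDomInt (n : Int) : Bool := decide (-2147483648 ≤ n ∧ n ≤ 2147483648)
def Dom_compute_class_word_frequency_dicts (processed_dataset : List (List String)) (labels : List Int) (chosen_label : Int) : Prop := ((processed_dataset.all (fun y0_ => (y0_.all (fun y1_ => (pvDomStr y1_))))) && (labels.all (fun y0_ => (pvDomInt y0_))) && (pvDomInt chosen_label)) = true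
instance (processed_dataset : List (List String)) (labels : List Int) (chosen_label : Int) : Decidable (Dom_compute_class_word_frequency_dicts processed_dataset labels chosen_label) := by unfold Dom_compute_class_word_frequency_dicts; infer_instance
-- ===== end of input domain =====

-- B replaces A's index-driven nested loops with running dict counts by a flat
-- gather of the chosen-label words (zip + comprehension) followed by a
-- per-distinct-word count; objective: simpler.

-- ===== PORT A =====
def compute_class_word_frequency_dicts (processed_dataset : List (List String)) (labels : List Int) (chosen_label : Int) : List (String × Int) :=
  ((PySem.List.pyRange 0 (PySem.List.len processed_dataset) 1).foldl
    (fun (d : PySem.Dict String Int) i =>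
      if PySem.List.pyGetD labels i 0 == chosen_label then
        (PySem.List.pyGetD processed_dataset i []).foldl
          (fun d w =>
            if !(d.contains w) then d.insert w 1
            else if d.contains w then d.insert w (d.getD w 0 + 1) else d) d
      else d)
    PySem.Dict.empty).items

-- ===== PORT B =====
def compute_class_word_frequency_dicts_alt (processed_dataset : List (List String)) (labels : List Int) (chosen_label : Int) : List (String × Int) :=
  let words := (processed_dataset.zip labels).foldl
    (fun (acc : List String) p => if p.2 == chosen_label then acc ++ p.1 else acc) []
  (PySem.List.dedup words).map (fun w => (w, (words.count w : Int)))

-- ===== PRECONDITION & SPEC =====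
-- A indexes labels[i] for every i below len(processed_dataset), so it raises
-- IndexError whenever labels is shorter than processed_dataset; Pre_ excludes
-- exactly those inputs.
def Pre_compute_class_word_frequency_dicts (processed_dataset : List (List String)) (labels : List Int) (chosen_label : Int) : Prop :=
  processed_dataset.length ≤ labels.length
instance (processed_dataset : List (List String)) (labels : List Int) (chosen_label : Int) : Decidable (Pre_compute_class_word_frequency_dicts processed_dataset labels chosen_label) := by unfold Pre_compute_class_word_frequency_dicts; infer_instance

def pvWitness_compute_class_word_frequency_dicts : List (List String) × List Int × Int :=
  ([["a", "a", "a"], ["b", "b", "a"]], ([1, 0], 1))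

def Spec_compute_class_word_frequency_dicts (processed_dataset : List (List String)) (labels : List Int) (chosen_label : Int) (out : List (String × Int)) : Prop := out = compute_class_word_frequency_dicts_alt processed_dataset labels chosen_label
instance (processed_dataset : List (List String)) (labels : List Int) (chosen_label : Int) (out : List (String × Int)) : Decidable (Spec_compute_class_word_frequency_dicts processed_dataset labels chosen_label out) := by unfold Spec_compute_class_word_frequency_dicts; infer_instance

-- ===== CLAIM (what is proved, stated in full; the proofs are below) =====
def Claim_equal_compute_class_word_frequency_dicts : Prop := ∀ (processed_dataset : List (List String)) (labels : List Int) (chosen_label : Int), Dom_compute_class_word_frequency_dicts processed_dataset labels chosen_label → Pre_compute_class_word_frequency_dicts processed_dataset labels chosen_label → Spec_compute_class_word_frequency_dicts processed_dataset labels chosen_label (compute_class_word_frequency_dicts processed_dataset labels chosen_label)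

-- ===== LEMMAS AND PROOFS =====

-- A's per-word update always writes (previous count + 1): when the word is
-- absent its count defaults to 0 and 1 = 0 + 1.
theorem pvIns_eq :
    (fun (d : PySem.Dict String Int) w =>
      if !(d.contains w) then d.insert w 1
      else if d.contains w then d.insert w (d.getD w 0 + 1) else d)
    = (fun (d : PySem.Dict String Int) w => d.insert w (d.getD w 0 + 1)) := by
  funext d w
  by_cases h : d.contains w = true
  · simp [h]
  · simp [h, PySem.Dict.getD_of_not_contains d 0 (by simpa using h)]

-- The append-if accumulator step is an append of a conditional block.
theorem pvStep_eq (chosen_label : Int) :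
    (fun (acc : List String) (p : List String × Int) =>
        if p.2 == chosen_label then acc ++ p.1 else acc)
    = (fun acc p => acc ++ (if p.2 == chosen_label then p.1 else [])) := by
  funext acc p
  by_cases h : p.2 == chosen_label <;> simp [h]

-- Index-driven fold over two lists = fold over their zip.
theorem pvRange_zip_foldl {α β σ : Type} :
    ∀ (xs : List α) (ys : List β) (da : α) (db : β) (F : α → β → σ → σ) (init : σ),
      xs.length ≤ ys.length →
      (List.range xs.length).foldl (fun s k => F (xs.getD k da) (ys.getD k db) s) init
        = (xs.zip ys).foldl (fun s p => F p.1 p.2 s) init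
  | [], _, _, _, _, _, _ => by simp
  | x :: xs, [], da, db, F, init, h => by simp at h
  | x :: xs, y :: ys, da, db, F, init, h => by
    simp only [List.length_cons, List.range_succ_eq_map, List.foldl_cons, List.foldl_map,
      List.getD_cons_zero, List.getD_cons_succ, List.zip_cons_cons]
    exact pvRange_zip_foldl xs ys da db F (F x y init) (by simpa using h)

-- Interleaved counting over the selected tweets = counting over the
-- concatenation of the selected tweets.
theorem pvZip_fold_eq (chosen_label : Int) :
    ∀ (ps : List (List String × Int)) (d : PySem.Dict String Int),
      ps.foldl (fun d p => if p.2 == chosen_label then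
          p.1.foldl (fun d w => d.insert w (d.getD w 0 + 1)) d else d) d
        = (ps.flatMap (fun p => if p.2 == chosen_label then p.1 else [])).foldl
            (fun d w => d.insert w (d.getD w 0 + 1)) d
  | [], d => by simp
  | p :: ps, d => by
    rw [List.foldl_cons, List.flatMap_cons, List.foldl_append]
    by_cases h : p.2 == chosen_label
    · rw [if_pos h, if_pos h]; exact pvZip_fold_eq chosen_label ps _
    · rw [if_neg h, if_neg h, List.foldl_nil]; exact pvZip_fold_eq chosen_label ps d

-- ===== VERDICT (by name: the statement is the Claim_ definition above) =====
theorem compute_class_word_frequency_dicts_spec : Claim_equal_compute_class_word_frequency_dicts := by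
  intro ds labels cl _ hpre
  unfold Spec_compute_class_word_frequency_dicts
  unfold compute_class_word_frequency_dicts compute_class_word_frequency_dicts_alt
  rw [pvIns_eq, pvStep_eq cl, PySem.List.foldl_append_eq_flatMap]
  simp only [PySem.List.len_eq, PySem.List.pyRange_zero_natCast, List.foldl_map,
    PySem.List.pyGetD_natCast]
  have h1 := pvRange_zip_foldl ds labels ([] : List String) (0 : Int)
      (fun t l (d : PySem.Dict String Int) =>
        if l == cl then List.foldl (fun d w => d.insert w (d.getD w 0 + 1)) d t else d)
      PySem.Dict.empty hpre
  simp only at h1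
  rw [List.nil_append, h1, pvZip_fold_eq cl,
      PySem.Dict.foldl_insert_getD_add_one_eq_counter,
      PySem.Dict.items_counter, PySem.List.dedup_eq_ofList]
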